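-- pv_equiv track=rewrite | github.com/MrBrantCode/unitest_baseline | mut_generate/mist_train_cf/cf_80486/solution.py | alternate_case_concat
-- ===== SOURCE A (Python) =====
-- def alternate_case_concat(s1, s2):
--     s = s1+s2
--     result = ''
--     upper = True
--     for char in s:
--         if char.isalpha():
--             if upper:
--                 result += char.upper()
--             else:
--                 result += char.lower()
--             upper = not upper
--         else:
--             result += char
--     return result
-- ===== SOURCE B (Python) =====
-- def alternate_case_concat(s1, s2):
--     s = s1 + s2
--     letters = [c for c in s if c.isalpha()]
--     styled = [c.upper() if i % 2 == 0 else c.lower() for i, c in enumerate(letters)]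
--     it = iter(styled)
--     return ''.join(next(it) if c.isalpha() else c for c in s)
-- ===== Notes on version B (the rewrite author's own statement) =====
-- stated objective: alternative
-- what changed: Replaces A's single stateful scan with a case-toggle flag by an extract-transform-merge structure: collect the letters, case each by the parity of its index among letters only, then rebuild the string by merging the styled letters back into the non-letter positions.
import Mathlib
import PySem

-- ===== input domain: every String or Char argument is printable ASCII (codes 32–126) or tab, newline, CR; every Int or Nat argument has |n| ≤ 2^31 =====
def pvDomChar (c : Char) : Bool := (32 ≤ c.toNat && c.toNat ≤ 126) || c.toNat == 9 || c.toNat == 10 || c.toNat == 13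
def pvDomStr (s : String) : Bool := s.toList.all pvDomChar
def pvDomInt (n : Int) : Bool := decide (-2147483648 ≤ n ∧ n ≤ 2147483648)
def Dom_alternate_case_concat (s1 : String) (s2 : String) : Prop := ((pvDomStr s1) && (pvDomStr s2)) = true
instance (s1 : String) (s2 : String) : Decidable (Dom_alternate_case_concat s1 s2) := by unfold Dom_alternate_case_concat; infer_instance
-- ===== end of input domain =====

-- B replaces A's single stateful toggle scan by an extract-transform-merge structure
-- (letters cased by index parity, then merged back); alternative decomposition, same result.


-- ===== PORT A =====
-- the for-loop of A: state is (result so far, upper flag)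
def pvLoopA : List Char → List Char → Bool → List Char
  | [], acc, _ => acc
  | c :: rest, acc, upper =>
    if PySem.Chars.isalpha c then
      pvLoopA rest (acc ++ [if upper then PySem.Chars.upperChar c else PySem.Chars.lowerChar c]) (!upper)
    else
      pvLoopA rest (acc ++ [c]) upper

def alternate_case_concat (s1 : String) (s2 : String) : String :=
  String.mk (pvLoopA (s1 ++ s2).toList [] true)

-- ===== PORT B =====
-- styled = [c.upper() if i % 2 == 0 else c.lower() for i, c in enumerate(letters)]
def pvStyled (letters : List Char) : List Char :=
  (PySem.List.enumerate letters).map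
    (fun ic => if PySem.Int.mod ic.1 2 == 0 then PySem.Chars.upperChar ic.2 else PySem.Chars.lowerChar ic.2)

-- ''.join(next(it) if c.isalpha() else c for c in s): consume the styled letters in order
def pvMergeB : List Char → List Char → List Char
  | [], _ => []
  | c :: rest, styled =>
    if PySem.Chars.isalpha c then
      match styled with
      | t :: ts => t :: pvMergeB rest ts
      | [] => []   -- unreachable: styled has exactly one entry per letter of the string
    else
      c :: pvMergeB rest styled

def alternate_case_concat_alt (s1 : String) (s2 : String) : String :=
  let l := (s1 ++ s2).toList
  String.mk (pvMergeB l (pvStyled (l.filter PySem.Chars.isalpha)))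

-- ===== PRECONDITION & SPEC =====
def Spec_alternate_case_concat (s1 : String) (s2 : String) (out : String) : Prop := out = alternate_case_concat_alt s1 s2
instance (s1 : String) (s2 : String) (out : String) : Decidable (Spec_alternate_case_concat s1 s2 out) := by unfold Spec_alternate_case_concat; infer_instance

-- ===== CLAIM (what is proved, stated in full; the proofs are below) =====
def Claim_equal_alternate_case_concat : Prop := ∀ (s1 : String) (s2 : String), Dom_alternate_case_concat s1 s2 → Spec_alternate_case_concat s1 s2 (alternate_case_concat s1 s2)

-- ===== LEMMAS AND PROOFS =====
-- alternating styling starting with flag b (proof-side characterisation of pvStyled)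
def pvAlt : Bool → List Char → List Char
  | _, [] => []
  | b, c :: cs => (if b then PySem.Chars.upperChar c else PySem.Chars.lowerChar c) :: pvAlt (!b) cs

theorem pvStyled_enum (letters : List Char) (n : Nat) :
    (PySem.List.enumerate letters (n : Int)).map
      (fun ic => if PySem.Int.mod ic.1 2 == 0 then PySem.Chars.upperChar ic.2 else PySem.Chars.lowerChar ic.2)
      = pvAlt (n % 2 == 0) letters := by
  induction letters generalizing n with
  | nil => simp [PySem.List.enumerate, pvAlt]
  | cons c cs ih =>
    rw [PySem.List.enumerate_cons, List.map_cons]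
    have hmod : PySem.Int.mod (n : Int) 2 = ((n % 2 : Nat) : Int) := by
      exact_mod_cast PySem.Int.mod_natCast n 2
    have hpush : ((n : Int) + 1) = ((n + 1 : Nat) : Int) := by push_cast; ring
    rw [hpush, ih (n + 1)]
    by_cases h : n % 2 = 0
    · have h1 : (n + 1) % 2 = 1 := by omega
      simp [h, h1, pvAlt]
      intro hx; exfalso; omega
    · have h0 : n % 2 = 1 := by omega
      have h1 : (n + 1) % 2 = 0 := by omega
      simp [h0, h1, pvAlt]
      intro hx; exfalso; omega

theorem pvLoopA_merge (l : List Char) (acc : List Char) (b : Bool) :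
    pvLoopA l acc b = acc ++ pvMergeB l (pvAlt b (l.filter PySem.Chars.isalpha)) := by
  induction l generalizing acc b with
  | nil => simp [pvLoopA, pvMergeB]
  | cons c rest ih =>
    by_cases h : PySem.Chars.isalpha c = true
    · simp [pvLoopA, pvMergeB, h, pvAlt, ih]
    · simp [pvLoopA, pvMergeB, h, ih]

-- ===== VERDICT (by name: the statement is the Claim_ definition above) =====
theorem alternate_case_concat_spec : Claim_equal_alternate_case_concat := by
  intro s1 s2 _
  have h0 := pvStyled_enum ((s1 ++ s2).toList.filter PySem.Chars.isalpha) 0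
  simp only [Nat.cast_zero, Nat.zero_mod, beq_self_eq_true] at h0
  simp only [Spec_alternate_case_concat, alternate_case_concat, alternate_case_concat_alt, pvStyled]
  rw [pvLoopA_merge, h0]
  rfl
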